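-- pv_equiv track=rewrite | github.com/Ghevil/Scraper-for-Wikipedia | Scraper.py | context_process
-- ===== SOURCE A (Python) =====
-- def context_process(context):
--     re=''
--     for i in context:
--         if i=='\n':
--             continue
--         else:
--             re+=i
--     context=re
--     re=''
--
--     f=False
--     for i in context:
--         if (not f) :
--             if i=='[':
--                 f=True
--             else :
--                 re+=i
--         if f:
--             if i==']':
--                 f=False
--     return re
-- ===== SOURCE B (Python) =====
-- def context_process(context):
--     # One combined pass: skip bracketed [...] spans with an inner loop over the
--     # shared iterator, drop newlines, collect kept chars and join once.
--     out = []
--     it = iter(context)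
--     for c in it:
--         if c == '[':
--             for d in it:
--                 if d == ']':
--                     break
--         elif c != '\n':
--             out.append(c)
--     return ''.join(out)
-- ===== Notes on version B (the rewrite author's own statement) =====
-- stated objective: faster
-- what changed: A's two separate passes (a newline-stripping pass building a string with +=, then a boolean-flag state machine over the result) are replaced by one combined scan that skips each bracketed span with an inner loop over the shared iterator, collects kept characters in a list and joins once.
import Mathlib
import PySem

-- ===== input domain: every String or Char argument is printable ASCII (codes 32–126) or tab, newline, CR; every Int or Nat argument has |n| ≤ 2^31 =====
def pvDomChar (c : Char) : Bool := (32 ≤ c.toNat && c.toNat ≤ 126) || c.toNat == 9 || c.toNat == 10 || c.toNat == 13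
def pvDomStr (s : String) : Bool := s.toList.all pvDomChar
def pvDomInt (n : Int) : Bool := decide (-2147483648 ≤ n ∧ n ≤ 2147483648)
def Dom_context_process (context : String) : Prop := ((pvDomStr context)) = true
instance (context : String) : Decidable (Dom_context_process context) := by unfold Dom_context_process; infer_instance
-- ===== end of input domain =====

-- B replaces A's two passes (newline-strip pass, then a boolean-flag bracket pass)
-- by one combined scan whose inner loop skips a bracketed span; objective: simpler.

-- ===== PORT A =====
-- A's first loop: re += i for every non-'\n' character.
def pvStripNl (re : List Char) : List Char → List Char
  | [] => re
  | i :: t => if i = '\n' then pvStripNl re t else pvStripNl (re ++ [i]) t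

-- A's second loop body, step for step: first the `if (not f)` block, then the `if f` block.
def pvStepA (st : List Char × Bool) (i : Char) : List Char × Bool :=
  let st1 := if st.2 = false then (if i = '[' then (st.1, true) else (st.1 ++ [i], st.2)) else st
  if st1.2 = true then (if i = ']' then (st1.1, false) else st1) else st1

def context_process (context : String) : String :=
  let re := pvStripNl [] context.toList
  let fin := re.foldl pvStepA ([], false)
  String.ofList fin.1

-- ===== PORT B =====
-- B's outer `for c in it` / inner `for d in it` over the shared iterator:
-- recursion on the remaining characters; the inner loop is pvSkipB.
mutual
def pvScanB : List Char → List Char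
  | [] => []
  | c :: t => if c = '[' then pvSkipB t else if c ≠ '\n' then c :: pvScanB t else pvScanB t
def pvSkipB : List Char → List Char
  | [] => []
  | d :: t => if d = ']' then pvScanB t else pvSkipB t
end

def context_process_alt (context : String) : String :=
  String.ofList (pvScanB context.toList)

-- ===== PRECONDITION & SPEC =====
def Spec_context_process (context : String) (out : String) : Prop := out = context_process_alt context
instance (context : String) (out : String) : Decidable (Spec_context_process context out) := by unfold Spec_context_process; infer_instance

-- ===== CLAIM (what is proved, stated in full; the proofs are below) =====
def Claim_equal_context_process : Prop := ∀ (context : String), Dom_context_process context → Spec_context_process context (context_process context)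

-- ===== LEMMAS AND PROOFS =====

-- A's machine without the newline pass, as direct recursion (f = false / f = true).
mutual
def pvStripA : List Char → List Char
  | [] => []
  | c :: t => if c = '[' then pvSkipA t else c :: pvStripA t
def pvSkipA : List Char → List Char
  | [] => []
  | d :: t => if d = ']' then pvStripA t else pvSkipA t
end

def pvNotNl (c : Char) : Bool := !(c = '\n')

theorem pvStripNl_eq (l : List Char) : ∀ re, pvStripNl re l = re ++ l.filter pvNotNl := by
  induction l with
  | nil => intro re; simp [pvStripNl]
  | cons c t ih =>
    intro re
    by_cases h : c = '\n' <;> simp [pvStripNl, pvNotNl, h, ih]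

theorem pvFoldA_eq (l : List Char) :
    ∀ re, (l.foldl pvStepA (re, false)).1 = re ++ pvStripA l
        ∧ (l.foldl pvStepA (re, true)).1 = re ++ pvSkipA l := by
  induction l with
  | nil => intro re; simp [pvStripA, pvSkipA]
  | cons c t ih =>
    intro re
    constructor
    · by_cases h : c = '[' <;>
        simp [List.foldl_cons, pvStepA, h, pvStripA, ih, List.append_assoc]
    · by_cases h : c = ']' <;>
        simp [List.foldl_cons, pvStepA, h, pvSkipA, ih]

theorem pvStrip_filter (l : List Char) :
    pvStripA (l.filter pvNotNl) = pvScanB l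
      ∧ pvSkipA (l.filter pvNotNl) = pvSkipB l := by
  induction l with
  | nil => simp [pvStripA, pvSkipA, pvScanB, pvSkipB]
  | cons c t ih =>
    by_cases hn : c = '\n'
    · simp [pvNotNl, hn, pvScanB, pvSkipB, ih]
    · constructor
      · by_cases h : c = '[' <;>
          simp [pvNotNl, hn, pvStripA, pvScanB, h, ih]
      · by_cases h : c = ']' <;>
          simp [pvNotNl, hn, pvSkipA, pvSkipB, h, ih]

-- ===== VERDICT (by name: the statement is the Claim_ definition above) =====
theorem context_process_spec : Claim_equal_context_process := by
  intro context _
  unfold Spec_context_process context_process context_process_alt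
  simp only [pvStripNl_eq, List.nil_append]
  rw [(pvFoldA_eq _ []).1, (pvStrip_filter context.toList).1]
  simp
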